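-- pv_equiv track=rewrite | github.com/zannensk/leveled | storage/database.py | calculate_phase
-- ===== SOURCE A (Python) =====
-- def calculate_phase(total_minutes):
--     """
--     Calculates Phase based on Total Minutes.
--     Curve: Lvl 1 = 30m. Increase 10m per level.
--     Returns: (Level, ProgressInLevel, LevelCost)
--     """
--     level = 1
--     cost = 30
--     while level < 100:
--         if total_minutes >= cost:
--             total_minutes -= cost
--             level += 1
--             cost = 30 + (level - 1) * 10
--         else:
--             break
--     return level, total_minutes, cost
-- ===== SOURCE B (Python) =====
-- def calculate_phase(total_minutes):
--     """
--     Calculates Phase based on Total Minutes.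
--     Binary-search the largest level L in [1, 100] whose cumulative cost
--     5*(L-1)*(L+4) fits in total_minutes, instead of walking level by level.
--     Returns: (Level, ProgressInLevel, LevelCost)
--     """
--     lo, hi = 1, 100
--     while lo < hi:
--         mid = (lo + hi + 1) // 2
--         if 5 * (mid - 1) * (mid + 4) <= total_minutes:
--             lo = mid
--         else:
--             hi = mid - 1
--     return lo, total_minutes - 5 * (lo - 1) * (lo + 4), 30 + (lo - 1) * 10
-- ===== Notes on version B (the rewrite author's own statement) =====
-- stated objective: faster
-- what changed: Replaces the level-by-level subtraction loop with a binary search over levels 1..100 using the closed-form cumulative cost 5*(L-1)*(L+4), then computes progress and cost directly.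
import Mathlib
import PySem

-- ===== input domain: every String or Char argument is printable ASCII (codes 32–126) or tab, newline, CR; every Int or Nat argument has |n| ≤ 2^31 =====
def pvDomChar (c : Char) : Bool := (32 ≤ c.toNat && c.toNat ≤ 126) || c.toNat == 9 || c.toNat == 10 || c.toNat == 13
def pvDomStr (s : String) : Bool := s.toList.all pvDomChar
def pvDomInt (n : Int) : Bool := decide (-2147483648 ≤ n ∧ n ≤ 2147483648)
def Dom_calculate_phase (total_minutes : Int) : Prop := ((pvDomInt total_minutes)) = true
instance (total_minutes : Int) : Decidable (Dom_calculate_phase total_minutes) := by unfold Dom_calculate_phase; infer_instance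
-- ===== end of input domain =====

-- B replaces A's level-by-level while loop by a binary search over levels using the
-- closed-form cumulative cost; fewer iterations, same exact value.

-- ===== PORT A =====
-- the while loop of A: state (level, cost, total_minutes); runs while level < 100
def pvLoopA (level cost total_minutes : Int) : Int × Int × Int :=
  if _h : level < 100 then
    if total_minutes ≥ cost then
      pvLoopA (level + 1) (30 + (level + 1 - 1) * 10) (total_minutes - cost)
    else (level, total_minutes, cost)
  else (level, total_minutes, cost)
termination_by (100 - level).toNat
decreasing_by omega

def calculate_phase (total_minutes : Int) : Int × Int × Int :=
  pvLoopA 1 30 total_minutes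

-- ===== PORT B =====
-- the while loop of B: binary search for the largest level with cumulative cost ≤ total_minutes
def pvLoopB (total_minutes lo hi : Int) : Int :=
  if _h : lo < hi then
    let mid := PySem.Int.floordiv (lo + hi + 1) 2
    if 5 * (mid - 1) * (mid + 4) ≤ total_minutes then
      pvLoopB total_minutes mid hi
    else
      pvLoopB total_minutes lo (mid - 1)
  else lo
termination_by (hi - lo).toNat
decreasing_by
  all_goals
    have h2 : PySem.Int.floordiv (lo + hi + 1) 2 = (lo + hi + 1) / 2 :=
      PySem.Int.floordiv_eq_ediv_of_pos (by omega)
    omega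

def calculate_phase_alt (total_minutes : Int) : Int × Int × Int :=
  let lo := pvLoopB total_minutes 1 100
  (lo, total_minutes - 5 * (lo - 1) * (lo + 4), 30 + (lo - 1) * 10)

-- ===== PRECONDITION & SPEC =====
def Spec_calculate_phase (total_minutes : Int) (out : Int × Int × Int) : Prop := out = calculate_phase_alt total_minutes
instance (total_minutes : Int) (out : Int × Int × Int) : Decidable (Spec_calculate_phase total_minutes out) := by unfold Spec_calculate_phase; infer_instance

-- ===== CLAIM (what is proved, stated in full; the proofs are below) =====
def Claim_equal_calculate_phase : Prop := ∀ (total_minutes : Int), Dom_calculate_phase total_minutes → Spec_calculate_phase total_minutes (calculate_phase total_minutes)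

-- ===== LEMMAS AND PROOFS =====

-- cumulative cost to reach level L: 5*(L-1)*(L+4)
def pvCum (L : Int) : Int := 5 * (L - 1) * (L + 4)

lemma pvCum_mono {a b : Int} (ha : 1 ≤ a) (hab : a ≤ b) : pvCum a ≤ pvCum b := by
  unfold pvCum; nlinarith

-- A's loop, started at any level L ≤ Lf whose state is consistent, ends at the
-- characterised final level Lf.
lemma pvLoopA_eq (t Lf : Int) (h1 : 1 ≤ Lf) (h100 : Lf ≤ 100)
    (hcum : pvCum Lf ≤ t) (hnext : Lf < 100 → t < pvCum (Lf + 1)) :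
    ∀ (n : Nat) (L : Int), (Lf - L).toNat = n → 1 ≤ L → L ≤ Lf →
      pvLoopA L (10 * L + 20) (t - pvCum L) = (Lf, t - pvCum Lf, 10 * Lf + 20) := by
  intro n
  induction n with
  | zero =>
    intro L hn hL1 hLf
    have hL : L = Lf := by omega
    subst hL
    rw [pvLoopA]
    by_cases h : L < 100
    · have hlt : t < pvCum (L + 1) := hnext h
      have hstep : pvCum (L + 1) = pvCum L + (10 * L + 20) := by unfold pvCum; ring
      have : ¬ (t - pvCum L ≥ 10 * L + 20) := by omega
      simp [h, this]
    · simp [h]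
  | succ k ih =>
    intro L hn hL1 hLf
    have hLlt : L < Lf := by omega
    have h100' : L < 100 := by omega
    have hstep : pvCum (L + 1) = pvCum L + (10 * L + 20) := by unfold pvCum; ring
    have hc1 : pvCum (L + 1) ≤ t := le_trans (pvCum_mono (by omega) (by omega)) hcum
    have hge : t - pvCum L ≥ 10 * L + 20 := by omega
    rw [pvLoopA]
    simp only [h100', hge, if_pos, dif_pos]
    have harg1 : 30 + (L + 1 - 1) * 10 = 10 * (L + 1) + 20 := by ring
    have harg2 : t - pvCum L - (10 * L + 20) = t - pvCum (L + 1) := by omega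
    rw [harg1, harg2]
    exact ih (L + 1) (by omega) (by omega) (by omega)

-- B's binary search maintains: lo is 1 or reachable, hi is 100 or one past the
-- last reachable level; the result satisfies both with lo = hi.
lemma pvLoopB_eq (t : Int) :
    ∀ (n : Nat) (lo hi : Int), (hi - lo).toNat ≤ n → 1 ≤ lo → lo ≤ hi → hi ≤ 100 →
      (lo = 1 ∨ pvCum lo ≤ t) → (hi = 100 ∨ t < pvCum (hi + 1)) →
      (1 ≤ pvLoopB t lo hi ∧ pvLoopB t lo hi ≤ 100 ∧
       (pvLoopB t lo hi = 1 ∨ pvCum (pvLoopB t lo hi) ≤ t) ∧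
       (pvLoopB t lo hi = 100 ∨ t < pvCum (pvLoopB t lo hi + 1))) := by
  intro n
  induction n with
  | zero =>
    intro lo hi hn h1 hlohi h100 hinvlo hinvhi
    have : lo = hi := by omega
    subst this
    rw [pvLoopB]
    simp only [lt_irrefl, dif_neg, not_false_iff]
    exact ⟨h1, h100, hinvlo, hinvhi⟩
  | succ k ih =>
    intro lo hi hn h1 hlohi h100 hinvlo hinvhi
    by_cases hlt : lo < hi
    case neg =>
      have heq : lo = hi := by omega
      subst heq
      rw [pvLoopB]
      simp only [hlt, dif_neg, not_false_iff]
      exact ⟨h1, h100, hinvlo, hinvhi⟩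
    rw [pvLoopB]
    have hmid : PySem.Int.floordiv (lo + hi + 1) 2 = (lo + hi + 1) / 2 :=
      PySem.Int.floordiv_eq_ediv_of_pos (by omega)
    simp only [hlt, dif_pos, hmid]
    set m := (lo + hi + 1) / 2 with hm
    have hb1 : lo + 1 ≤ m := by omega
    have hb2 : m ≤ hi := by omega
    by_cases hc : 5 * (m - 1) * (m + 4) ≤ t
    · rw [if_pos hc]
      exact ih m hi (by omega) (by omega) hb2 h100
        (Or.inr (by unfold pvCum; exact hc)) hinvhi
    · rw [if_neg hc]
      refine ih lo (m - 1) (by omega) h1 (by omega) (by omega) hinvlo ?_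
      right
      have h11 : m - 1 + 1 = m := by ring
      rw [h11]
      unfold pvCum
      exact lt_of_not_ge hc

-- ===== VERDICT (by name: the statement is the Claim_ definition above) =====
theorem calculate_phase_spec : Claim_equal_calculate_phase := by
  unfold Claim_equal_calculate_phase Spec_calculate_phase
  intro t _
  unfold calculate_phase calculate_phase_alt
  obtain ⟨hr1, hr100, hrlo, hrhi⟩ :=
    pvLoopB_eq t 99 1 100 (by decide) (by norm_num) (by norm_num) (by norm_num)
      (Or.inl rfl) (Or.inl rfl)
  set r := pvLoopB t 1 100 with hrdef
  by_cases ht : t < 30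
  · -- both stop at level 1
    have hr : r = 1 := by
      rcases hrlo with h | h
      · exact h
      · by_contra hne
        have h2r : (2 : Int) ≤ r := by omega
        have : (30 : Int) ≤ pvCum r := by
          have := pvCum_mono (a := 2) (b := r) (by norm_num) h2r
          unfold pvCum at this ⊢; omega
        omega
    rw [pvLoopA]
    have hng : ¬ (t ≥ (30 : Int)) := by omega
    simp only [show (1:Int) < 100 by norm_num, dif_pos, hng, if_neg, not_false_iff]
    rw [hr]
    norm_num
  · -- A's loop reaches exactly level r
    have hcum : pvCum r ≤ t := by
      rcases hrlo with h | h
      · rw [h]; unfold pvCum; omega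
      · exact h
    have hnext : r < 100 → t < pvCum (r + 1) := by
      intro h; rcases hrhi with h' | h'
      · omega
      · exact h'
    have hA := pvLoopA_eq t r hr1 hr100 hcum hnext ((r - 1).toNat) 1 rfl
      (by norm_num) hr1
    have h30 : (10 : Int) * 1 + 20 = 30 := by norm_num
    have h0 : pvCum 1 = 0 := by unfold pvCum; ring
    rw [h30, h0, sub_zero] at hA
    rw [hA]
    unfold pvCum
    refine Prod.ext rfl (Prod.ext ?_ ?_)
    · simp
    · simp
      ring
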